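-- pv_equiv track=rewrite | github.com/hwakyung99/Beakjoon | SWEA/D3/6190. 정곤이의 단조 증가하는 수/정곤이의 단조 증가하는 수.py | is_dan
-- ===== SOURCE A (Python) =====
-- def is_dan(num):
--     if num // 10 == 0 or num % 10 == 0:
--         return False
--
--     remain = num % 10
--     num = num // 10
--     while num > 0:
--         if num % 10 > remain:
--             return False
--         remain = num % 10
--         num = num // 10
--     return True
-- ===== SOURCE B (Python) =====
-- def is_dan(num):
--     if num // 10 == 0 or num % 10 == 0:
--         return False
--     digits = []
--     n = num
--     while n > 0:
--         digits.append(n % 10)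
--         n //= 10
--     return digits == sorted(digits, reverse=True)
-- ===== Notes on version B (the rewrite author's own statement) =====
-- stated objective: alternative
-- what changed: Replaces A's interleaved adjacent-pair comparison inside the digit-stripping loop with a build-then-check strategy: extract all digits into a list, then compare the list with its descending-sorted copy.
import Mathlib
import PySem

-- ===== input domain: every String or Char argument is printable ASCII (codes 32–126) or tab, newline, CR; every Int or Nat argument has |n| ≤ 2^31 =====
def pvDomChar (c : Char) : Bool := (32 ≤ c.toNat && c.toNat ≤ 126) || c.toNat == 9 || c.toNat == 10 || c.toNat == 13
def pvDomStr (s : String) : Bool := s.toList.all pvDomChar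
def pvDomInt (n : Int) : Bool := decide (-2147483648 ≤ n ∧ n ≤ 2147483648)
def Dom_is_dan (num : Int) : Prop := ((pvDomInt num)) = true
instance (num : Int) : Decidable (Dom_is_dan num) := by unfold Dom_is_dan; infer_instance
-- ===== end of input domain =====

-- B replaces A's interleaved adjacent-pair scan with build-digit-list-then-compare-to-its-descending-sort (alternative decomposition, same behaviour).

-- ===== PORT A =====
-- the while loop of A: state (remain, num)
def isDanLoop (remain num : Int) : Bool :=
  if h : num > 0 then
    if PySem.Int.mod num 10 > remain then false
    else isDanLoop (PySem.Int.mod num 10) (PySem.Int.floordiv num 10)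
  else true
termination_by num.toNat
decreasing_by
  rw [PySem.Int.floordiv_eq_ediv_of_pos (by omega)]; omega

def is_dan (num : Int) : Bool :=
  if PySem.Int.floordiv num 10 == 0 || PySem.Int.mod num 10 == 0 then false
  else isDanLoop (PySem.Int.mod num 10) (PySem.Int.floordiv num 10)

-- ===== PORT B =====
-- the digit-collecting while loop of B (digits appended least-significant first)
def digitsLoop (n : Int) : List Int :=
  if h : n > 0 then PySem.Int.mod n 10 :: digitsLoop (PySem.Int.floordiv n 10) else []
termination_by n.toNat
decreasing_by
  rw [PySem.Int.floordiv_eq_ediv_of_pos (by omega)]; omega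

def is_dan_alt (num : Int) : Bool :=
  if PySem.Int.floordiv num 10 == 0 || PySem.Int.mod num 10 == 0 then false
  else
    let digits := digitsLoop num
    digits == PySem.List.sorted digits (fun x => x) true

-- ===== PRECONDITION & SPEC =====
def Spec_is_dan (num : Int) (out : Bool) : Prop := out = is_dan_alt num
instance (num : Int) (out : Bool) : Decidable (Spec_is_dan num out) := by unfold Spec_is_dan; infer_instance

-- ===== CLAIM (what is proved, stated in full; the proofs are below) =====
def Claim_equal_is_dan : Prop := ∀ (num : Int), Dom_is_dan num → Spec_is_dan num (is_dan num)

-- ===== LEMMAS AND PROOFS =====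

theorem digitsLoop_pos {n : Int} (h : n > 0) :
    digitsLoop n = PySem.Int.mod n 10 :: digitsLoop (PySem.Int.floordiv n 10) := by
  rw [digitsLoop]; simp [h]

theorem digitsLoop_nonpos {n : Int} (h : ¬ n > 0) : digitsLoop n = [] := by
  rw [digitsLoop]; simp [h]

-- a list equals its descending-stable-sorted copy iff it is pairwise non-increasing
theorem eq_sorted_rev_iff (xs : List Int) :
    (xs = PySem.List.sorted xs (fun x => x) true) ↔ xs.Pairwise (fun a b => b ≤ a) := by
  constructor
  · intro h
    have := PySem.List.sorted_pairwise_rev (xs := xs) (key := fun x : Int => x)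
    rw [← h] at this
    exact this
  · intro h
    exact Eq.symm (PySem.List.sorted_rev_eq_self_of_pairwise xs (fun x : Int => x) h)

-- A's loop decides exactly the non-increasing condition on remain :: digits
theorem isDanLoop_eq (n remain : Int) :
    isDanLoop remain n = true ↔ (remain :: digitsLoop n).Pairwise (fun a b : Int => b ≤ a) := by
  by_cases h : n > 0
  · rw [isDanLoop, digitsLoop_pos h]
    simp only [h, dite_true]
    by_cases hc : PySem.Int.mod n 10 > remain
    · simp only [hc, if_true, List.pairwise_cons]
      constructor
      · intro hfalse; exact absurd hfalse (by simp)
      · rintro ⟨hall, -⟩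
        exact absurd (hall _ (List.mem_cons_self)) (by omega)
    · simp only [hc, if_false]
      rw [isDanLoop_eq (PySem.Int.floordiv n 10) (PySem.Int.mod n 10)]
      simp only [List.pairwise_cons]
      constructor
      · rintro ⟨hall, htail⟩
        refine ⟨?_, hall, htail⟩
        intro b hb
        rcases List.mem_cons.mp hb with rfl | hb
        · omega
        · exact le_trans (hall b hb) (by omega)
      · rintro ⟨-, hall, htail⟩
        exact ⟨hall, htail⟩
  · rw [isDanLoop, digitsLoop_nonpos h]
    simp [h]
termination_by n.toNat
decreasing_by
  rw [PySem.Int.floordiv_eq_ediv_of_pos (by omega)]; omega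

-- ===== VERDICT (by name: the statement is the Claim_ definition above) =====
theorem is_dan_spec : Claim_equal_is_dan := by
  intro num _
  unfold Spec_is_dan is_dan is_dan_alt
  by_cases hg : (PySem.Int.floordiv num 10 == 0 || PySem.Int.mod num 10 == 0) = true
  · rw [if_pos hg, if_pos hg]
  · rw [if_neg hg, if_neg hg]
    by_cases h : num > 0
    · have : isDanLoop (PySem.Int.mod num 10) (PySem.Int.floordiv num 10)
          = (digitsLoop num == PySem.List.sorted (digitsLoop num) (fun x => x) true) := by
        rcases Bool.eq_false_or_eq_true
            (digitsLoop num == PySem.List.sorted (digitsLoop num) (fun x => x) true) with hb | hb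
        · rw [hb]
          rw [beq_iff_eq, eq_sorted_rev_iff, digitsLoop_pos h] at hb
          exact (isDanLoop_eq _ _).mpr hb
        · rw [hb]
          rw [beq_eq_false_iff_ne, ne_eq, eq_sorted_rev_iff] at hb
          rw [digitsLoop_pos h] at hb
          rcases hx : isDanLoop (PySem.Int.mod num 10) (PySem.Int.floordiv num 10) with - | -
          · rfl
          · exact absurd ((isDanLoop_eq _ _).mp hx) hb
      exact this
    · have hf : PySem.Int.floordiv num 10 * 10 + PySem.Int.mod num 10 = num :=
        PySem.Int.floordiv_mul_add_mod num 10
      have hm0 : 0 ≤ PySem.Int.mod num 10 := PySem.Int.mod_nonneg num (by omega)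
      have hm1 : PySem.Int.mod num 10 < 10 := PySem.Int.mod_lt num (by omega)
      have hfneg : ¬ PySem.Int.floordiv num 10 > 0 := by omega
      have hl : isDanLoop (PySem.Int.mod num 10) (PySem.Int.floordiv num 10) = true := by
        rw [isDanLoop, dif_neg hfneg]
      rw [hl, digitsLoop_nonpos h]
      simp [PySem.List.sorted]
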